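-- pv_equiv track=rewrite | github.com/f4pga/f4pga-arch-defs | utils/lib/mux.py | clog2
-- ===== SOURCE A (Python) =====
-- def clog2(x):
--     """Ceiling log 2 of x.
--
--     >>> clog2(0), clog2(1), clog2(2), clog2(3), clog2(4)
--     (0, 0, 1, 2, 2)
--     >>> clog2(5), clog2(6), clog2(7), clog2(8), clog2(9)
--     (3, 3, 3, 3, 4)
--     >>> clog2(1 << 31)
--     31
--     >>> clog2(1 << 63)
--     63
--     >>> clog2(1 << 11)
--     11
--     """
--     x -= 1
--     i = 0
--     while True:
--         if x <= 0:
--             break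
--         x = x >> 1
--         i += 1
--     return i
-- ===== SOURCE B (Python) =====
-- def clog2(x):
--     """Ceiling log 2 of x."""
--     return (x - 1).bit_length() if x > 0 else 0
-- ===== Notes on version B (the rewrite author's own statement) =====
-- stated objective: idiomatic
-- what changed: Replaces the shift-and-count while loop with a single closed-form call to int.bit_length on the decremented argument, guarded so non-positive arguments keep the original's result.
import Mathlib
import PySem

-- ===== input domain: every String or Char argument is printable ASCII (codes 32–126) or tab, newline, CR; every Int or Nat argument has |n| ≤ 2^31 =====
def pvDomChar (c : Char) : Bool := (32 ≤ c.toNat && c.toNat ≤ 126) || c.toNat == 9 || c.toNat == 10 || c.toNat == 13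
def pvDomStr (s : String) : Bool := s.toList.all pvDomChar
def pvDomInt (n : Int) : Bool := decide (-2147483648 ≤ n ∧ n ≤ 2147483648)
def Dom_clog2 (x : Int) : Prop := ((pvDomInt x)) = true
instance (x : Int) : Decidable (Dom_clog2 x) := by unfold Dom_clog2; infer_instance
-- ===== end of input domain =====

-- B replaces A's shift-and-count loop by the closed-form bit_length of x-1 (guarded for x ≤ 0); equivalence of return values is proved for all ints in Dom.

-- ===== PORT A =====
-- the 'while True: if x <= 0: break; x >>= 1; i += 1' loop; Python's '>>' on int is floor division by 2
def clog2Loop (x : Int) (i : Int) : Int :=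
  if x ≤ 0 then i else clog2Loop (PySem.Int.floordiv x 2) (i + 1)
termination_by x.toNat
decreasing_by
  simp only [PySem.Int.floordiv, Int.fdiv_eq_ediv]
  omega

def clog2 (x : Int) : Int := clog2Loop (x - 1) 0

-- ===== PORT B =====
-- (x - 1).bit_length() for a nonnegative argument n: 0 if n = 0 else log2 n + 1
def bitLength (n : Nat) : Int := if n = 0 then 0 else (Nat.log2 n : Int) + 1

def clog2_alt (x : Int) : Int := if x > 0 then bitLength (x - 1).toNat else 0

-- ===== PRECONDITION & SPEC =====
def Spec_clog2 (x : Int) (out : Int) : Prop := out = clog2_alt x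
instance (x : Int) (out : Int) : Decidable (Spec_clog2 x out) := by unfold Spec_clog2; infer_instance

-- ===== CLAIM (what is proved, stated in full; the proofs are below) =====
def Claim_equal_clog2 : Prop := ∀ (x : Int), Dom_clog2 x → Spec_clog2 x (clog2 x)

-- ===== LEMMAS AND PROOFS =====

theorem clog2Loop_nat (n : Nat) : ∀ i : Int, clog2Loop (n : Int) i = i + bitLength n := by
  induction n using Nat.strong_induction_on with
  | _ n ih =>
    intro i
    rw [clog2Loop.eq_def]
    by_cases h : (n : Int) ≤ 0
    · have hn : n = 0 := by omega
      simp [hn, bitLength]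
    · have hn : 0 < n := by omega
      have hfd : PySem.Int.floordiv (n : Int) 2 = ((n / 2 : Nat) : Int) := by
        simp only [PySem.Int.floordiv, Int.fdiv_eq_ediv]
        omega
      rw [if_neg h, hfd, ih (n / 2) (by omega)]
      have hbl : bitLength n = bitLength (n / 2) + 1 := by
        rcases Nat.lt_or_ge n 2 with h2 | h2
        · interval_cases n <;> decide
        · have hd : 0 < n / 2 := Nat.div_pos h2 (by norm_num)
          have : Nat.log2 n = Nat.log2 (n / 2) + 1 := by
            rw [Nat.log2_def]; simp [h2]
          simp only [bitLength, this]
          rw [if_neg (by omega), if_neg (by omega)]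
          push_cast; ring
      rw [hbl]; ring

theorem clog2_spec : Claim_equal_clog2 := by
  intro x _
  unfold Spec_clog2 clog2 clog2_alt
  by_cases hx : x > 0
  · have h : x - 1 = (((x - 1).toNat : Nat) : Int) := by omega
    rw [if_pos hx]
    calc clog2Loop (x - 1) 0 = clog2Loop (((x - 1).toNat : Nat) : Int) 0 := by rw [← h]
      _ = 0 + bitLength (x - 1).toNat := clog2Loop_nat _ 0
      _ = bitLength (x - 1).toNat := by ring
  · rw [if_neg hx, clog2Loop.eq_def]
    simp
    omega
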